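-- pv_equiv track=rewrite | github.com/MIchaelKa/coding | python/problems/broker.py | solution
-- ===== SOURCE A (Python) =====
-- def solution(x):
--     len_x = len(x)
--     max_t = 0
--
--     for i in range(len_x):
--         for j in range(i+1, len_x):
--             t = x[j] - x[i]
--             if t > max_t:
--                 max_t = t
--
--     return max_t
-- ===== SOURCE B (Python) =====
-- def solution(x):
--     best = 0
--     m = None
--     for v in x:
--         if m is None:
--             m = v
--         else:
--             if v - m > best:
--                 best = v - m
--             if v < m:
--                 m = v
--     return best
-- ===== Notes on version B (the rewrite author's own statement) =====
-- stated objective: faster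
-- what changed: Replaced the quadratic all-pairs scan with a single pass that tracks the running minimum and updates the best difference.
import Mathlib
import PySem

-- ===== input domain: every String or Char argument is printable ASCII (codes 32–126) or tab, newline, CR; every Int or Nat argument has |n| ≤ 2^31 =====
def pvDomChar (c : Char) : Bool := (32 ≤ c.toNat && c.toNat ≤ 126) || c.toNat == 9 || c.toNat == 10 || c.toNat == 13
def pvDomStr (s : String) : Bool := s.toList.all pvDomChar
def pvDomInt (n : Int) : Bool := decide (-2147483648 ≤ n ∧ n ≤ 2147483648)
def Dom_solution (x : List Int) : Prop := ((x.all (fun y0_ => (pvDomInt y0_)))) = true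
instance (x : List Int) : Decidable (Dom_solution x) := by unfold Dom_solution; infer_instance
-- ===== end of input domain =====

-- B is a single pass with a running minimum instead of A's all-pairs double loop (asymptotically faster).

-- ===== PORT A =====
-- literal port of A's nested loops; pyGetD is exact here: both indices are always in range
def solution (x : List Int) : Int :=
  (PySem.List.pyRange 0 (x.length : Int) 1).foldl (fun max_t i =>
    (PySem.List.pyRange (i + 1) (x.length : Int) 1).foldl (fun max_t j =>
      let t := PySem.List.pyGetD x j 0 - PySem.List.pyGetD x i 0
      if t > max_t then t else max_t) max_t) 0

-- ===== PORT B =====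
-- literal port of Source B: state (best, m) where m = None before the first element
def solution_alt (x : List Int) : Int :=
  (x.foldl (fun (s : Int × Option Int) v =>
    match s with
    | (best, none) => (best, some v)
    | (best, some m) =>
        let best' := if v - m > best then v - m else best
        let m' := if v < m then v else m
        (best', some m')) ((0 : Int), (none : Option Int))).1

-- ===== PRECONDITION & SPEC =====
def Spec_solution (x : List Int) (out : Int) : Prop := out = solution_alt x
instance (x : List Int) (out : Int) : Decidable (Spec_solution x out) := by unfold Spec_solution; infer_instance

-- ===== CLAIM (what is proved, stated in full; the proofs are below) =====
def Claim_equal_solution : Prop := ∀ (x : List Int), Dom_solution x → Spec_solution x (solution x)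

-- ===== LEMMAS AND PROOFS =====

-- inner loop of A with pivot a, accumulator m, over the remaining elements
def innerIf (a m : Int) (l : List Int) : Int :=
  l.foldl (fun acc v => if v - a > acc then v - a else acc) m

-- A's whole computation as a structural recursion on the list
def gA : List Int → Int → Int
  | [], m => m
  | a :: rest, m => gA rest (innerIf a m rest)

theorem innerIf_nil (a m : Int) : innerIf a m [] = m := rfl

theorem innerIf_cons (a m v : Int) (l : List Int) :
    innerIf a m (v :: l) = innerIf a (max m (v - a)) l := by
  simp only [innerIf, List.foldl_cons]
  congr 1
  split_ifs with h <;> omega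

theorem innerIf_max_right (a : Int) (l : List Int) :
    ∀ c d, innerIf a (max c d) l = max (innerIf a c l) d := by
  induction l with
  | nil => intro c d; simp [innerIf_nil]
  | cons v t ih =>
      intro c d
      rw [innerIf_cons, innerIf_cons]
      rw [show max (max c d) (v - a) = max (max c (v - a)) d by omega]
      exact ih _ _

theorem innerIf_min_pivot (m v : Int) (l : List Int) :
    ∀ c, innerIf v (innerIf m c l) l = innerIf (min m v) c l := by
  induction l with
  | nil => intro c; simp [innerIf_nil]
  | cons w t ih =>
      intro c
      rw [innerIf_cons, innerIf_cons, innerIf_cons]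
      rw [innerIf_max_right, ih, ← innerIf_max_right]
      congr 1
      omega

-- ---- A = gA ----

theorem solution_outer (x : List Int) :
    ∀ (k : Nat) (acc : Int),
      (PySem.List.pyRange (k : Int) (x.length : Int) 1).foldl (fun max_t i =>
        (PySem.List.pyRange (i + 1) (x.length : Int) 1).foldl (fun max_t j =>
          let t := PySem.List.pyGetD x j 0 - PySem.List.pyGetD x i 0
          if t > max_t then t else max_t) max_t) acc
      = gA (x.drop k) acc := by
  intro k
  induction hn : x.length - k generalizing k with
  | zero =>
      intro acc
      have hk : x.length ≤ k := by omega
      rw [PySem.List.pyRange_one_eq_nil (by exact_mod_cast hk)]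
      rw [List.drop_eq_nil_of_le hk]
      rfl
  | succ n ih =>
      intro acc
      have hk : k < x.length := by omega
      rw [PySem.List.pyRange_one_cons (by exact_mod_cast hk)]
      rw [List.foldl_cons]
      have hdrop : x.drop k = x[k] :: x.drop (k + 1) :=
        List.drop_eq_getElem_cons hk
      have hcast : (k : Int) + 1 = ((k + 1 : Nat) : Int) := by push_cast; ring
      rw [hcast, ih (k + 1) (by omega)]
      have hinner :
          (PySem.List.pyRange ((k + 1 : Nat) : Int) (x.length : Int) 1).foldl (fun max_t j =>
            let t := PySem.List.pyGetD x j 0 - PySem.List.pyGetD x ((k : Nat) : Int) 0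
            if t > max_t then t else max_t) acc
          = innerIf x[k] acc (x.drop (k + 1)) := by
        rw [PySem.List.foldl_pyRange_pyGetD' x 0
              (fun acc v => if v - PySem.List.pyGetD x ((k : Nat) : Int) 0 > acc
                            then v - PySem.List.pyGetD x ((k : Nat) : Int) 0 else acc)
              acc (by positivity)]
        rw [PySem.List.pyGetD_natCast, List.getD_eq_getElem x 0 hk]
        simp [innerIf]
      rw [hinner, hdrop]
      rfl

theorem solution_eq_gA (x : List Int) : solution x = gA x 0 := by
  have h := solution_outer x 0 0
  simpa [solution] using h

-- ---- B = gA ----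

theorem alt_fold_eq (rest : List Int) :
    ∀ (best m : Int),
      (rest.foldl (fun (s : Int × Option Int) v =>
        match s with
        | (best, none) => (best, some v)
        | (best, some m) =>
            let best' := if v - m > best then v - m else best
            let m' := if v < m then v else m
            (best', some m')) (best, some m)).1
      = gA (m :: rest) best := by
  induction rest with
  | nil => intro best m; rfl
  | cons v t ih =>
      intro best m
      rw [List.foldl_cons]
      show (t.foldl _ ((if v - m > best then v - m else best),
          some (if v < m then v else m))).1 = _
      rw [ih]
      show gA t (innerIf (if v < m then v else m)
        (if v - m > best then v - m else best) t)
        = gA t (innerIf v (innerIf m best (v :: t)) t)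
      congr 1
      rw [innerIf_cons, innerIf_min_pivot]
      have h1 : (if v < m then v else m) = min m v := by split_ifs <;> omega
      have h2 : (if v - m > best then v - m else best) = max best (v - m) := by
        split_ifs <;> omega
      rw [h1, h2]

theorem solution_alt_eq_gA (x : List Int) : solution_alt x = gA x 0 := by
  cases x with
  | nil => rfl
  | cons a rest =>
      show (rest.foldl _ ((0 : Int), some a)).1 = _
      rw [alt_fold_eq rest 0 a]

-- ===== VERDICT (by name: the statement is the Claim_ definition above) =====
theorem solution_spec : Claim_equal_solution := by
  intro x _
  unfold Spec_solution
  rw [solution_eq_gA, solution_alt_eq_gA]
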